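-- pv_equiv track=rewrite | github.com/fanyalun/tablemoe-sc26 | third_party/pregated-moe/pregated_moe/runtime/model_offload.py | _is_deepseek_vl2_resident_name
-- ===== SOURCE A (Python) =====
-- def _is_deepseek_vl2_direct_param(name: str) -> bool:
--     return _get_deepseek_vl2_direct_param_name(name) is not None
--
-- def _get_deepseek_vl2_direct_param_name(name: str) -> str | None:
--     candidates = ("image_newline", "view_seperator", "tile_indicators")
--     for candidate in candidates:
--         if name == candidate or name.endswith(f".{candidate}"):
--             return candidate
--     return None
--
-- def _is_deepseek_vl2_resident_name(name: str) -> bool: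
--     if _is_deepseek_vl2_direct_param(name):
--         return True
--
--     fixed_prefixes = (
--         "vision",
--         "projector",
--         "aligner",
--     )
--     if any(name == prefix or name.startswith(f"{prefix}.") for prefix in fixed_prefixes):
--         return True
--
--     return False
-- ===== SOURCE B (Python) =====
-- _DIRECT = ("image_newline", "view_seperator", "tile_indicators")
-- _PREFIXES = ("vision", "projector", "aligner")
--
--
-- def _peel_prefix(s: str) -> bool:
--     # A dot-free prefix word heads `s` iff repeatedly peeling the trailing
--     # dot-segment (rpartition) eventually yields exactly that word.
--     if s in _PREFIXES:
--         return True
--     head, sep, _ = s.rpartition(".")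
--     return bool(sep) and _peel_prefix(head)
--
--
-- def _is_deepseek_vl2_resident_name(name: str) -> bool:
--     if name.rpartition(".")[2] in _DIRECT:
--         return True
--     return _peel_prefix(name)
-- ===== Notes on version B (the rewrite author's own statement) =====
-- stated objective: alternative
-- what changed: B replaces A's candidate-scanning loops (an equality/endswith test and an equality/startswith test per candidate word) by a recursive right-peeling: it tests the rpartition tail once against the direct-param words, then recursively strips the trailing dot-segment with rpartition, checking each remaining dot-prefix for equality with a prefix word.
import Mathlib
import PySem

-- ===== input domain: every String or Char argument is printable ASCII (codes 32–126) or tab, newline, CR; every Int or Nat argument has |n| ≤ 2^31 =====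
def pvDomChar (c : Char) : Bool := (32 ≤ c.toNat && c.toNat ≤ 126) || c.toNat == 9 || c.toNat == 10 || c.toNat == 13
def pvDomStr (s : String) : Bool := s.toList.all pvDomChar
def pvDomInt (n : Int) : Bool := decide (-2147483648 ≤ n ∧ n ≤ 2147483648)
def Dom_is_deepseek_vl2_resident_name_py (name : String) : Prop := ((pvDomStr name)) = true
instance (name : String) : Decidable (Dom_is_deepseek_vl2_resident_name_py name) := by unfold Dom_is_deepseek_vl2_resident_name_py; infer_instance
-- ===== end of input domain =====

-- B replaces A's candidate-scanning loops (startswith/endswith per candidate) by a recursive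
-- right-peeling of trailing dot-segments via rpartition (objective: alternative).

-- ===== PORT A =====
-- the candidates tuple of _get_deepseek_vl2_direct_param_name, as char lists
def pvDirectCands : List (List Char) :=
  ["image_newline".toList, "view_seperator".toList, "tile_indicators".toList]

-- the loop of _get_deepseek_vl2_direct_param_name: first candidate with
-- name == candidate or name.endswith("." + candidate)
def pvGetDirect : List (List Char) → List Char → Option (List Char)
  | [], _ => none
  | c :: rest, n =>
      if n = c ∨ PySem.Chars.endswith n ('.' :: c) = true then some c else pvGetDirect rest n

-- _is_deepseek_vl2_direct_param: the loop's result is not None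
def pvIsDirect (n : List Char) : Bool := (pvGetDirect pvDirectCands n).isSome

def pvFixedPrefixes : List (List Char) :=
  ["vision".toList, "projector".toList, "aligner".toList]

def is_deepseek_vl2_resident_name_py (name : String) : Bool :=
  let n := name.toList
  if pvIsDirect n then true
  else if pvFixedPrefixes.any (fun p => decide (n = p) || PySem.Chars.startswith n (p ++ ['.'])) then true
  else false

-- ===== PORT B =====
-- s.rpartition('.')[2]: the characters after the last '.' (whole string if no dot) — exact
def pvLastSeg (n : List Char) : List Char := (n.reverse.takeWhile (· ≠ '.')).reverse

-- s.rpartition('.')[0] when a dot is present: the characters before the last '.' — exact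
def pvRpartHead (n : List Char) : List Char := ((n.reverse.dropWhile (· ≠ '.')).tail).reverse

-- _peel_prefix: s in _PREFIXES, or peel the trailing dot-segment and recurse
def pvPeel (n : List Char) : Bool :=
  if n ∈ pvFixedPrefixes then true
  else if _h : '.' ∈ n then pvPeel (pvRpartHead n)
  else false
termination_by n.length
decreasing_by
  have h' : '.' ∈ n.reverse := by simpa using _h
  have hne : n.reverse.dropWhile (· ≠ '.') ≠ [] := by
    intro he
    rcases (List.dropWhile_eq_nil_iff).mp he _ h' with hc
    simp at hc
  have h1 : (n.reverse.dropWhile (· ≠ '.')).length ≤ n.length := by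
    simpa using List.length_dropWhile_le (p := (· ≠ '.')) (l := n.reverse)
  have h2 : 0 < (n.reverse.dropWhile (· ≠ '.')).length := List.length_pos_of_ne_nil hne
  simp only [pvRpartHead, List.length_reverse, List.length_tail]
  omega

def is_deepseek_vl2_resident_name_py_alt (name : String) : Bool :=
  let n := name.toList
  if pvLastSeg n ∈ pvDirectCands then true
  else pvPeel n

-- ===== PRECONDITION & SPEC =====
def Spec_is_deepseek_vl2_resident_name_py (name : String) (out : Bool) : Prop := out = is_deepseek_vl2_resident_name_py_alt name
instance (name : String) (out : Bool) : Decidable (Spec_is_deepseek_vl2_resident_name_py name out) := by unfold Spec_is_deepseek_vl2_resident_name_py; infer_instance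

-- ===== CLAIM (what is proved, stated in full; the proofs are below) =====
def Claim_equal_is_deepseek_vl2_resident_name_py : Prop := ∀ (name : String), Dom_is_deepseek_vl2_resident_name_py name → Spec_is_deepseek_vl2_resident_name_py name (is_deepseek_vl2_resident_name_py name)

-- ===== LEMMAS AND PROOFS =====

-- first-segment characterisation: for a dot-free p, (n = p or n starts with "p.") iff
-- the segment of n before its first '.' equals p
theorem pv_head_char (p n : List Char) (hp : '.' ∉ p) :
    (n = p ∨ (p ++ ['.']) <+: n) ↔ n.takeWhile (· ≠ '.') = p := by
  constructor
  · rintro (rfl | ⟨r, rfl⟩)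
    · exact List.takeWhile_eq_self_iff.mpr (by intro a ha; simp; rintro rfl; exact hp ha)
    · rw [List.append_assoc, List.takeWhile_append_of_pos (by intro a ha; simp; rintro rfl; exact hp ha)]
      simp
  · intro h
    have hsplit := List.takeWhile_append_dropWhile (p := (· ≠ '.')) (l := n)
    rcases hd : n.dropWhile (· ≠ '.') with _ | ⟨a, r⟩
    · left; rw [← hsplit, hd, h]; simp
    · right
      have ha := List.head_dropWhile_not (p := (· ≠ '.')) (l := n)
        (by rw [hd]; exact List.cons_ne_nil a r)
      simp only [hd, List.head_cons, decide_eq_false_iff_not, not_not] at ha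
      refine ⟨r, ?_⟩
      rw [← hsplit, hd, h, ha]; simp

-- last-segment characterisation, the mirror image via reversal
theorem pv_tail_char (c n : List Char) (hc : '.' ∉ c) :
    (n = c ∨ ('.' :: c) <:+ n) ↔ (n.reverse.takeWhile (· ≠ '.')).reverse = c := by
  rw [List.reverse_eq_iff, ← pv_head_char c.reverse n.reverse (by simpa using hc)]
  constructor
  · rintro (rfl | ⟨r, rfl⟩)
    · left; rfl
    · right; exact ⟨r.reverse, by simp⟩
  · rintro (h | ⟨r, hr⟩)
    · left; simpa using congrArg List.reverse h
    · right
      refine ⟨r.reverse, ?_⟩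
      have := congrArg List.reverse hr
      simpa using this

-- takeWhile stops no later than a failing element
theorem pv_takeWhile_append_stop (p : Char → Bool) (y : Char) (hy : p y = false)
    (xs ys : List Char) : (xs ++ y :: ys).takeWhile p = xs.takeWhile p := by
  induction xs with
  | nil => simp [List.takeWhile, hy]
  | cons a xs ih =>
      by_cases ha : p a
      · simp [List.takeWhile, ha, ih]
      · simp [List.takeWhile, ha]

-- first element of a nonempty dropWhile fails the predicate
theorem pv_dropWhile_head_false (p : Char → Bool) (l : List Char) (a : Char) (r : List Char)
    (h : l.dropWhile p = a :: r) : p a = false := by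
  induction l generalizing r with
  | nil => simp [List.dropWhile] at h
  | cons b t ih =>
      by_cases hb : p b
      · exact ih r (by simpa [List.dropWhile, hb] using h)
      · simp [List.dropWhile, hb] at h
        rcases h with ⟨rfl, rfl⟩
        simpa using hb

-- decomposition around the LAST dot: n = rpartHead ++ '.' :: lastSeg
theorem pv_rpart_decomp (n : List Char) (h : '.' ∈ n) :
    n = pvRpartHead n ++ '.' :: pvLastSeg n := by
  have h' : '.' ∈ n.reverse := by simpa using h
  have hne : n.reverse.dropWhile (· ≠ '.') ≠ [] := by
    intro he
    rcases (List.dropWhile_eq_nil_iff).mp he _ h' with hc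
    simp at hc
  have hsplit := List.takeWhile_append_dropWhile (p := (· ≠ '.')) (l := n.reverse)
  rcases hd : n.reverse.dropWhile (· ≠ '.') with _ | ⟨a, r⟩
  · exact absurd hd hne
  · have ha : a = '.' := by
      have := pv_dropWhile_head_false (fun x => decide (x ≠ '.')) n.reverse a r hd
      simpa using this
    have hrev : n.reverse = n.reverse.takeWhile (· ≠ '.') ++ '.' :: r := by
      conv_lhs => rw [← hsplit]
      rw [hd, ha]
    have hn2 := congrArg List.reverse hrev
    simp only [List.reverse_reverse, List.reverse_append, List.reverse_cons] at hn2
    rw [pvRpartHead, pvLastSeg, hd, ha]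
    simpa using hn2

-- peel s = true  iff  the first dot-segment of s is a fixed prefix word
theorem pv_peel_char_aux (k : Nat) : ∀ n : List Char, n.length ≤ k →
    pvPeel n = decide (n.takeWhile (· ≠ '.') ∈ pvFixedPrefixes) := by
  induction k with
  | zero =>
      intro n hn
      have hnil : n = [] := List.eq_nil_of_length_eq_zero (Nat.le_zero.mp hn)
      subst hnil
      rw [pvPeel]
      simp [pvFixedPrefixes]
  | succ k ih =>
      intro n hn
      by_cases hmem : n ∈ pvFixedPrefixes
      · rw [pvPeel, if_pos hmem]
        have h2 := hmem
        simp only [pvFixedPrefixes, List.mem_cons, List.not_mem_nil, or_false] at h2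
        rcases h2 with rfl | rfl | rfl <;> decide
      · by_cases hdot : '.' ∈ n
        · have hd := pv_rpart_decomp n hdot
          have hlen : (pvRpartHead n).length ≤ k := by
            have := congrArg List.length hd
            simp at this
            omega
          rw [pvPeel, if_neg hmem, dif_pos hdot, ih (pvRpartHead n) hlen]
          congr 1
          conv_rhs => rw [hd]
          rw [pv_takeWhile_append_stop (fun x => decide (x ≠ '.')) '.' (by decide)
            (pvRpartHead n) (pvLastSeg n)]
        · have ht : n.takeWhile (· ≠ '.') = n :=
            List.takeWhile_eq_self_iff.mpr (by intro a ha; simp; rintro rfl; exact hdot ha)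
          rw [pvPeel, if_neg hmem, dif_neg hdot, ht]
          simp [hmem]

theorem pv_peel_char (n : List Char) :
    pvPeel n = decide (n.takeWhile (· ≠ '.') ∈ pvFixedPrefixes) :=
  pv_peel_char_aux n.length n le_rfl

-- A computes exactly: first segment a prefix word, or last segment a direct-param word
set_option maxHeartbeats 1000000 in
theorem pv_A_char (name : String) :
    is_deepseek_vl2_resident_name_py name =
      (decide (name.toList.takeWhile (· ≠ '.') ∈ pvFixedPrefixes)
        || decide (pvLastSeg name.toList ∈ pvDirectCands)) := by
  rw [Bool.eq_iff_iff]
  simp only [is_deepseek_vl2_resident_name_py, pvIsDirect, pvDirectCands, pvGetDirect,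
    pvFixedPrefixes, pvLastSeg, List.any_cons, List.any_nil,
    PySem.Chars.endswith_iff, PySem.Chars.startswith_iff, Bool.or_eq_true, decide_eq_true_eq,
    List.mem_cons, List.not_mem_nil]
  set n := name.toList with hn
  have e1 := pv_tail_char "image_newline".toList n (by decide)
  have e2 := pv_tail_char "view_seperator".toList n (by decide)
  have e3 := pv_tail_char "tile_indicators".toList n (by decide)
  have f1 := pv_head_char "vision".toList n (by decide)
  have f2 := pv_head_char "projector".toList n (by decide)
  have f3 := pv_head_char "aligner".toList n (by decide)
  split_ifs <;> simp_all

-- B computes the same disjunction (direct check first, then the peeled prefix check)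
theorem pv_B_char (name : String) :
    is_deepseek_vl2_resident_name_py_alt name =
      (decide (name.toList.takeWhile (· ≠ '.') ∈ pvFixedPrefixes)
        || decide (pvLastSeg name.toList ∈ pvDirectCands)) := by
  simp only [is_deepseek_vl2_resident_name_py_alt]
  rw [pv_peel_char]
  by_cases h : pvLastSeg name.toList ∈ pvDirectCands <;> simp [h]

-- ===== VERDICT (by name: the statement is the Claim_ definition above) =====
theorem is_deepseek_vl2_resident_name_py_spec : Claim_equal_is_deepseek_vl2_resident_name_py := by
  intro name _
  unfold Spec_is_deepseek_vl2_resident_name_py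
  rw [pv_A_char, pv_B_char]
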